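-- pv_equiv track=rewrite | github.com/ByzenMa/LanPaint-diffusers | app/trans.py | simulate_channel_process
-- ===== SOURCE A (Python) =====
-- def simulate_channel_process(r_channel_start, r_channel_end,
--                              g_channel_start, g_channel_end,
--                              b_channel_start, b_channel_end):
--     # 收集所有时间点并排序，去重
--     points = sorted(set([0, 1, r_channel_start, r_channel_end,
--                          g_channel_start, g_channel_end,
--                          b_channel_start, b_channel_end]))
--
--     channel_list = []
--     channel_start_end_list = [[], []]
--     prev_point = points[0]
--
--     for current_point in points[1:]:
--         active_channels = []
--         if r_channel_start <= prev_point < r_channel_end: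
--             active_channels.append('r')
--         if g_channel_start <= prev_point < g_channel_end:
--             active_channels.append('g')
--         if b_channel_start <= prev_point < b_channel_end:
--             active_channels.append('b')
--
--         if not active_channels:
--             active_channels.append('none')  # 使用 'none' 表示无通道参与
--
--         # 按字母顺序排序通道名称，确保一致性
--         active_channels_sorted = ''.join(sorted(active_channels))
--         channel_list.append(active_channels_sorted)
--         channel_start_end_list[0].append(prev_point)
--         channel_start_end_list[1].append(current_point)
--         prev_point = current_point
--
--     return channel_list, channel_start_end_list
-- ===== SOURCE B (Python) =====
-- def simulate_channel_process(r_channel_start, r_channel_end,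
--                              g_channel_start, g_channel_end,
--                              b_channel_start, b_channel_end):
--     # Sweep-line: walk the sorted breakpoints once, maintaining a running set of
--     # active channels updated by start/end events, instead of re-testing every
--     # channel's interval condition for each segment.
--     chans = [('r', r_channel_start, r_channel_end),
--              ('g', g_channel_start, g_channel_end),
--              ('b', b_channel_start, b_channel_end)]
--     points = sorted({0, 1, r_channel_start, r_channel_end,
--                      g_channel_start, g_channel_end,
--                      b_channel_start, b_channel_end})
--
--     labels = []
--     starts = []
--     ends = []
--     active = set()
--     prev = points[0]
--     active |= {n for n, s, e in chans if s == prev and s < e}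
--     active -= {n for n, s, e in chans if e == prev}
--     for p in points[1:]:
--         labels.append(''.join(sorted(active)) or 'none')
--         starts.append(prev)
--         ends.append(p)
--         active |= {n for n, s, e in chans if s == p and s < e}
--         active -= {n for n, s, e in chans if e == p}
--         prev = p
--     return labels, [starts, ends]
-- ===== Notes on version B (the rewrite author's own statement) =====
-- stated objective: alternative
-- what changed: B replaces A's per-segment re-test of all three interval conditions by a sweep-line over the sorted breakpoints that maintains a running active-channel set updated by start/end events at each point.
import Mathlib
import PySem

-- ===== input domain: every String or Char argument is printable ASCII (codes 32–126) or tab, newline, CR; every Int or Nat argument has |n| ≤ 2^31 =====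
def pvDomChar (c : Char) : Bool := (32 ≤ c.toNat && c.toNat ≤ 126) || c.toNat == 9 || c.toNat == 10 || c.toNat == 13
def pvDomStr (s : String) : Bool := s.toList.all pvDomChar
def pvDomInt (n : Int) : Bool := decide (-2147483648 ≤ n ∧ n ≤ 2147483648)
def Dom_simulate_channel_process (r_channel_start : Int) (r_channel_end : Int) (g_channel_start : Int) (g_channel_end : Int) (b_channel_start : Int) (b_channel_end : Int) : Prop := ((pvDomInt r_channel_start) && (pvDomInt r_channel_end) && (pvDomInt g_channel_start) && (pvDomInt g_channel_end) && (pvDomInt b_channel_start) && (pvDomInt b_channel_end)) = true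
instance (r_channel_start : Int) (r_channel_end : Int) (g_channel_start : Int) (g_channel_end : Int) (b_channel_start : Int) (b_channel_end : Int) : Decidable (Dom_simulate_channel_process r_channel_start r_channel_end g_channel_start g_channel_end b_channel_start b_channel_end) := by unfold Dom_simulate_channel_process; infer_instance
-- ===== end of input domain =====

-- B re-segments the timeline by a sweep-line over start/end events with a running
-- active set, instead of A's per-segment re-test of all three interval conditions
-- (objective: alternative algorithm, same cost at this fixed channel count).

-- ===== PORT A =====
-- label of the segment starting at prev: A's three membership tests, 'none' fallback, sort, join
def pvLabelA (rs re gs ge bs be prev : Int) : String :=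
  let ac : List String := []
  let ac := if rs ≤ prev ∧ prev < re then ac ++ ["r"] else ac
  let ac := if gs ≤ prev ∧ prev < ge then ac ++ ["g"] else ac
  let ac := if bs ≤ prev ∧ prev < be then ac ++ ["b"] else ac
  let ac := if ac = [] then ac ++ ["none"] else ac
  PySem.Str.join "" (PySem.List.sorted ac (fun x => x) false)

-- A's for-loop over points[1:] carrying prev_point; cons-building the appended lists
def pvALoop (rs re gs ge bs be : Int) (prev : Int) : List Int → List String × List Int × List Int
  | [] => ([], [], [])
  | p :: rest =>
    let out := pvALoop rs re gs ge bs be p rest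
    (pvLabelA rs re gs ge bs be prev :: out.1, prev :: out.2.1, p :: out.2.2)

def simulate_channel_process (r_channel_start : Int) (r_channel_end : Int) (g_channel_start : Int) (g_channel_end : Int) (b_channel_start : Int) (b_channel_end : Int) : List String × List (List Int) :=
  let points := PySem.List.sorted (PySem.Set.ofList [0, 1, r_channel_start, r_channel_end, g_channel_start, g_channel_end, b_channel_start, b_channel_end]) (fun x => x) false
  match points with
  | [] => ([], [[], []])  -- unreachable: points contains 0
  | p0 :: rest =>
    let out := pvALoop r_channel_start r_channel_end g_channel_start g_channel_end b_channel_start b_channel_end p0 rest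
    (out.1, [out.2.1, out.2.2])

-- ===== PORT B =====
def pvChans (rs re gs ge bs be : Int) : List (String × Int × Int) :=
  [("r", rs, re), ("g", gs, ge), ("b", bs, be)]

-- active |= {n for n,s,e in chans if s == p and s < e}; active -= {n for n,s,e in chans if e == p}
def pvStep (chans : List (String × Int × Int)) (active : PySem.Set String) (p : Int) : PySem.Set String :=
  PySem.Set.diff
    (PySem.Set.union active
      (PySem.Set.ofList ((chans.filter (fun c => c.2.1 == p && decide (c.2.1 < c.2.2))).map (fun c => c.1))))
    (PySem.Set.ofList ((chans.filter (fun c => c.2.2 == p)).map (fun c => c.1)))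

-- ''.join(sorted(active)) or 'none'
def pvLabelB (active : PySem.Set String) : String :=
  let s := PySem.Str.join "" (PySem.List.sorted active (fun x => x) false)
  if s = "" then "none" else s

def pvBLoop (chans : List (String × Int × Int)) (prev : Int) (active : PySem.Set String) : List Int → List String × List Int × List Int
  | [] => ([], [], [])
  | p :: rest =>
    let out := pvBLoop chans p (pvStep chans active p) rest
    (pvLabelB active :: out.1, prev :: out.2.1, p :: out.2.2)

def simulate_channel_process_alt (r_channel_start : Int) (r_channel_end : Int) (g_channel_start : Int) (g_channel_end : Int) (b_channel_start : Int) (b_channel_end : Int) : List String × List (List Int) :=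
  let chans := pvChans r_channel_start r_channel_end g_channel_start g_channel_end b_channel_start b_channel_end
  let points := PySem.List.sorted (PySem.Set.ofList [0, 1, r_channel_start, r_channel_end, g_channel_start, g_channel_end, b_channel_start, b_channel_end]) (fun x => x) false
  match points with
  | [] => ([], [[], []])  -- unreachable: points contains 0
  | p0 :: rest =>
    let out := pvBLoop chans p0 (pvStep chans PySem.Set.empty p0) rest
    (out.1, [out.2.1, out.2.2])

-- ===== PRECONDITION & SPEC =====
def Spec_simulate_channel_process (r_channel_start : Int) (r_channel_end : Int) (g_channel_start : Int) (g_channel_end : Int) (b_channel_start : Int) (b_channel_end : Int) (out : List String × List (List Int)) : Prop := out = simulate_channel_process_alt r_channel_start r_channel_end g_channel_start g_channel_end b_channel_start b_channel_end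
instance (r_channel_start : Int) (r_channel_end : Int) (g_channel_start : Int) (g_channel_end : Int) (b_channel_start : Int) (b_channel_end : Int) (out : List String × List (List Int)) : Decidable (Spec_simulate_channel_process r_channel_start r_channel_end g_channel_start g_channel_end b_channel_start b_channel_end out) := by unfold Spec_simulate_channel_process; infer_instance

-- ===== CLAIM (what is proved, stated in full; the proofs are below) =====
def Claim_equal_simulate_channel_process : Prop := ∀ (r_channel_start : Int) (r_channel_end : Int) (g_channel_start : Int) (g_channel_end : Int) (b_channel_start : Int) (b_channel_end : Int), Dom_simulate_channel_process r_channel_start r_channel_end g_channel_start g_channel_end b_channel_start b_channel_end → Spec_simulate_channel_process r_channel_start r_channel_end g_channel_start g_channel_end b_channel_start b_channel_end (simulate_channel_process r_channel_start r_channel_end g_channel_start g_channel_end b_channel_start b_channel_end)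

-- ===== LEMMAS AND PROOFS =====

-- A's active-channel list at a point, as a plain list (what pvLabelA joins when nonempty)
def pvActA (rs re gs ge bs be p : Int) : List String :=
  (if rs ≤ p ∧ p < re then ["r"] else []) ++ (if gs ≤ p ∧ p < ge then ["g"] else []) ++ (if bs ≤ p ∧ p < be then ["b"] else [])

theorem pvActA_nodup (rs re gs ge bs be p : Int) : (pvActA rs re gs ge bs be p).Nodup := by
  unfold pvActA; split_ifs <;> decide

theorem mem_pvActA (rs re gs ge bs be p : Int) (n : String) :
    n ∈ pvActA rs re gs ge bs be p ↔
      (n = "r" ∧ rs ≤ p ∧ p < re) ∨ (n = "g" ∧ gs ≤ p ∧ p < ge) ∨ (n = "b" ∧ bs ≤ p ∧ p < be) := by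
  by_cases h1 : rs ≤ p ∧ p < re <;> by_cases h2 : gs ≤ p ∧ p < ge <;> by_cases h3 : bs ≤ p ∧ p < be <;>
    simp [pvActA, h1, h2, h3]

theorem mem_pvAdds (rs re gs ge bs be p : Int) (n : String) :
    n ∈ ((pvChans rs re gs ge bs be).filter (fun c => c.2.1 == p && decide (c.2.1 < c.2.2))).map (fun c => c.1) ↔
      (n = "r" ∧ rs = p ∧ rs < re) ∨ (n = "g" ∧ gs = p ∧ gs < ge) ∨ (n = "b" ∧ bs = p ∧ bs < be) := by
  constructor
  · intro h
    simp [pvChans, List.mem_filter] at h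
    obtain ⟨b, hb, hlt⟩ := h
    rcases hb with ⟨h1,h2,h3⟩|⟨h1,h2,h3⟩|⟨h1,h2,h3⟩ <;> subst_vars <;> tauto
  · intro h
    simp [pvChans, List.mem_filter]
    rcases h with ⟨h1,h2,h3⟩|⟨h1,h2,h3⟩|⟨h1,h2,h3⟩ <;> subst_vars <;> [exact ⟨re, by tauto, h3⟩; exact ⟨ge, by tauto, h3⟩; exact ⟨be, by tauto, h3⟩]

theorem mem_pvRems (rs re gs ge bs be p : Int) (n : String) :
    n ∈ ((pvChans rs re gs ge bs be).filter (fun c => c.2.2 == p)).map (fun c => c.1) ↔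
      (n = "r" ∧ re = p) ∨ (n = "g" ∧ ge = p) ∨ (n = "b" ∧ be = p) := by
  constructor
  · intro h
    simp [pvChans, List.mem_filter] at h
    obtain ⟨a, ha⟩ := h
    rcases ha with ⟨h1,h2,h3⟩|⟨h1,h2,h3⟩|⟨h1,h2,h3⟩ <;> subst_vars <;> tauto
  · intro h
    simp [pvChans, List.mem_filter]
    rcases h with ⟨h1,h2⟩|⟨h1,h2⟩|⟨h1,h2⟩ <;> subst_vars <;> [exact ⟨rs, by tauto⟩; exact ⟨gs, by tauto⟩; exact ⟨bs, by tauto⟩]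

theorem pvSortedRev (l : List String) (h : List.Pairwise (fun a b => a < b) l.reverse) :
    PySem.List.sorted l (fun x => x) false = l.reverse :=
  PySem.List.sorted_eq_of_perm_of_pairwise_lt l l.reverse (fun x => x) (List.reverse_perm l) h

theorem pv_s_rgb : PySem.List.sorted ["r", "g", "b"] (fun x => x) false = ["b", "g", "r"] := by
  simpa using pvSortedRev ["r", "g", "b"] (by simp [List.pairwise_cons, String.lt_iff_toList_lt]; decide)
theorem pv_s_rg : PySem.List.sorted ["r", "g"] (fun x => x) false = ["g", "r"] := by
  simpa using pvSortedRev ["r", "g"] (by simp [List.pairwise_cons, String.lt_iff_toList_lt]; decide)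
theorem pv_s_rb : PySem.List.sorted ["r", "b"] (fun x => x) false = ["b", "r"] := by
  simpa using pvSortedRev ["r", "b"] (by simp [List.pairwise_cons, String.lt_iff_toList_lt]; decide)
theorem pv_s_gb : PySem.List.sorted ["g", "b"] (fun x => x) false = ["b", "g"] := by
  simpa using pvSortedRev ["g", "b"] (by simp [List.pairwise_cons, String.lt_iff_toList_lt]; decide)
theorem pv_s_one (x : String) : PySem.List.sorted [x] (fun y => y) false = [x] := by
  exact pvSortedRev [x] (by simp)
theorem pv_s_nil : PySem.List.sorted ([] : List String) (fun y => y) false = [] := by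
  exact pvSortedRev [] (by simp)

theorem pv_j0 : PySem.Str.join "" ([] : List String) = "" := by
  rw [← String.toList_inj]; simp [PySem.Str.toList_join]
theorem pv_j1 (x : String) : PySem.Str.join "" [x] = x := by
  rw [← String.toList_inj]; simp [PySem.Str.toList_join, PySem.Chars.join_singleton]
theorem pv_j_gr : PySem.Str.join "" ["g", "r"] = "gr" := by
  rw [← String.toList_inj]; simp [PySem.Str.toList_join]; decide
theorem pv_j_br : PySem.Str.join "" ["b", "r"] = "br" := by
  rw [← String.toList_inj]; simp [PySem.Str.toList_join]; decide
theorem pv_j_bg : PySem.Str.join "" ["b", "g"] = "bg" := by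
  rw [← String.toList_inj]; simp [PySem.Str.toList_join]; decide
theorem pv_j_bgr : PySem.Str.join "" ["b", "g", "r"] = "bgr" := by
  rw [← String.toList_inj]; simp [PySem.Str.toList_join]; decide

theorem pvLabelA_eq (rs re gs ge bs be p : Int) (active : PySem.Set String)
    (hnd : active.Nodup) (hmem : ∀ n, n ∈ active ↔ n ∈ pvActA rs re gs ge bs be p) :
    pvLabelA rs re gs ge bs be p = pvLabelB active := by
  have hperm : active.Perm (pvActA rs re gs ge bs be p) :=
    (List.perm_ext_iff_of_nodup hnd (pvActA_nodup rs re gs ge bs be p)).2 hmem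
  have hsort : PySem.List.sorted active (fun x => x) false
      = PySem.List.sorted (pvActA rs re gs ge bs be p) (fun x => x) false :=
    PySem.List.sorted_eq_sorted_of_perm _ _ _ (fun a b h => h) hperm
  by_cases h1 : rs ≤ p ∧ p < re <;> by_cases h2 : gs ≤ p ∧ p < ge <;> by_cases h3 : bs ≤ p ∧ p < be <;>
    simp [pvActA, h1, h2, h3] at hsort <;>
    simp [pvLabelA, pvLabelB, h1, h2, h3, hsort,
      pv_s_rgb, pv_s_rg, pv_s_rb, pv_s_gb, pv_s_one, pv_s_nil,
      pv_j0, pv_j1, pv_j_gr, pv_j_br, pv_j_bg, pv_j_bgr]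

-- membership in pvStep
theorem mem_pvStep (rs re gs ge bs be : Int) (active : PySem.Set String) (p : Int) (n : String) :
    n ∈ pvStep (pvChans rs re gs ge bs be) active p ↔
      ((n ∈ active ∨ n ∈ ((pvChans rs re gs ge bs be).filter (fun c => c.2.1 == p && decide (c.2.1 < c.2.2))).map (fun c => c.1)) ∧
        n ∉ ((pvChans rs re gs ge bs be).filter (fun c => c.2.2 == p)).map (fun c => c.1)) := by
  unfold pvStep
  simp [PySem.Set.mem_diff, PySem.Set.mem_union, PySem.Set.mem_ofList]

theorem pvStep_nodup (chans : List (String × Int × Int)) (active : PySem.Set String) (p : Int)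
    (h : active.Nodup) : (pvStep chans active p).Nodup := by
  unfold pvStep
  apply PySem.Set.nodup_diff
  apply PySem.Set.nodup_union
  exact h

-- the loop invariant transfer
theorem pvLoop_eq (rs re gs ge bs be : Int) :
    ∀ (tail : List Int) (prev : Int) (active : PySem.Set String),
      (prev :: tail).Pairwise (· < ·) →
      (rs ≤ prev ∨ rs ∈ tail) → (re ≤ prev ∨ re ∈ tail) →
      (gs ≤ prev ∨ gs ∈ tail) → (ge ≤ prev ∨ ge ∈ tail) →
      (bs ≤ prev ∨ bs ∈ tail) → (be ≤ prev ∨ be ∈ tail) →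
      active.Nodup →
      (∀ n, n ∈ active ↔ n ∈ pvActA rs re gs ge bs be prev) →
      pvALoop rs re gs ge bs be prev tail = pvBLoop (pvChans rs re gs ge bs be) prev active tail := by
  intro tail
  induction tail with
  | nil => intros; rfl
  | cons p rest ih =>
    intro prev active hpw hrs hre hgs hge hbs hbe hnd hmem
    have hpc := List.pairwise_cons.1 hpw
    have hprevp : prev < p := hpc.1 p (List.mem_cons_self)
    have hrest : ∀ x ∈ rest, p < x := (List.pairwise_cons.1 hpc.2).1
    have shift : ∀ x : Int, (x ≤ prev ∨ x ∈ p :: rest) → (x ≤ p ∨ x ∈ rest) := by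
      intro x hx
      rcases hx with hx | hx
      · exact Or.inl (le_trans hx (le_of_lt hprevp))
      · rcases List.mem_cons.1 hx with hx | hx
        · exact Or.inl (le_of_eq hx)
        · exact Or.inr hx
    have hmem' : ∀ n, n ∈ pvStep (pvChans rs re gs ge bs be) active p ↔ n ∈ pvActA rs re gs ge bs be p := by
      intro n
      rw [mem_pvStep, mem_pvAdds, mem_pvRems, hmem n, mem_pvActA, mem_pvActA]
      have loc : ∀ x : Int, (x ≤ prev ∨ x ∈ p :: rest) → (x ≤ prev ∨ x = p ∨ p < x) := by
        intro x hx
        rcases hx with hx | hx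
        · exact Or.inl hx
        · rcases List.mem_cons.1 hx with hx | hx
          · exact Or.inr (Or.inl hx)
          · exact Or.inr (Or.inr (hrest x hx))
      have lrs := loc rs hrs; have lre := loc re hre
      have lgs := loc gs hgs; have lge := loc ge hge
      have lbs := loc bs hbs; have lbe := loc be hbe
      by_cases h1 : n = "r" <;> by_cases h2 : n = "g" <;> by_cases h3 : n = "b" <;>
        simp [h1, h2, h3] <;> omega
    show (pvLabelA rs re gs ge bs be prev :: (pvALoop rs re gs ge bs be p rest).1,
          prev :: (pvALoop rs re gs ge bs be p rest).2.1,
          p :: (pvALoop rs re gs ge bs be p rest).2.2) = _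
    rw [pvLabelA_eq rs re gs ge bs be prev active hnd hmem,
        ih p (pvStep (pvChans rs re gs ge bs be) active p) hpc.2
          (shift rs hrs) (shift re hre) (shift gs hgs) (shift ge hge) (shift bs hbs) (shift be hbe)
          (pvStep_nodup _ _ _ hnd) hmem']
    rfl

-- ===== VERDICT (by name: the statement is the Claim_ definition above) =====
theorem pvInit_mem (rs re gs ge bs be p0 : Int)
    (hmin : ∀ v ∈ ([rs, re, gs, ge, bs, be] : List Int), p0 ≤ v) :
    ∀ n, n ∈ pvStep (pvChans rs re gs ge bs be) PySem.Set.empty p0 ↔ n ∈ pvActA rs re gs ge bs be p0 := by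
  intro n
  rw [mem_pvStep, mem_pvAdds, mem_pvRems, mem_pvActA]
  have h1 := hmin rs (by simp); have h2 := hmin re (by simp)
  have h3 := hmin gs (by simp); have h4 := hmin ge (by simp)
  have h5 := hmin bs (by simp); have h6 := hmin be (by simp)
  by_cases hr : n = "r" <;> by_cases hg : n = "g" <;> by_cases hb : n = "b" <;>
    simp [hr, hg, hb, PySem.Set.empty] <;> omega


theorem simulate_channel_process_spec : Claim_equal_simulate_channel_process := by
  intro rs re gs ge bs be _
  unfold Spec_simulate_channel_process simulate_channel_process simulate_channel_process_alt
  cases hP : PySem.List.sorted (PySem.Set.ofList [0, 1, rs, re, gs, ge, bs, be]) (fun x => x) false with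
  | nil => rfl
  | cons p0 rest =>
    have hpw : (p0 :: rest).Pairwise (fun a b : Int => a < b) := by
      rw [← hP]; exact PySem.List.sorted_ofList_pairwise_lt _
    have hmemP : ∀ v ∈ ([0, 1, rs, re, gs, ge, bs, be] : List Int), v ∈ p0 :: rest := by
      intro v hv
      rw [← hP, PySem.List.mem_sorted, PySem.Set.mem_ofList]
      exact hv
    have hmemP6 : ∀ v ∈ ([rs, re, gs, ge, bs, be] : List Int), v ∈ p0 :: rest := by
      intro v hv
      apply hmemP
      simp only [List.mem_cons, List.not_mem_nil, or_false] at hv ⊢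
      tauto
    have hmin : ∀ v ∈ ([rs, re, gs, ge, bs, be] : List Int), p0 ≤ v := by
      intro v hv
      rcases List.mem_cons.1 (hmemP6 v hv) with h | h
      · exact le_of_eq h.symm
      · exact le_of_lt ((List.pairwise_cons.1 hpw).1 v h)
    have hloc : ∀ v ∈ ([rs, re, gs, ge, bs, be] : List Int), v ≤ p0 ∨ v ∈ rest := by
      intro v hv
      rcases List.mem_cons.1 (hmemP6 v hv) with h | h
      · exact Or.inl (le_of_eq h)
      · exact Or.inr h
    have := pvLoop_eq rs re gs ge bs be rest p0 (pvStep (pvChans rs re gs ge bs be) PySem.Set.empty p0)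
      hpw (hloc rs (by simp)) (hloc re (by simp)) (hloc gs (by simp)) (hloc ge (by simp))
      (hloc bs (by simp)) (hloc be (by simp))
      (pvStep_nodup _ _ _ (by simp [PySem.Set.empty]))
      (pvInit_mem rs re gs ge bs be p0 hmin)
    simp only [this]
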